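-- pv_equiv track=rewrite | github.com/pglombardo/pwpush-cli | pwpush/utils.py | check_secret_conditions
-- ===== SOURCE A (Python) =====
-- import string
--
-- def check_secret_conditions(
--     secret: str,
--     punctuation: bool = True,
--     upper: bool = True,
--     digit: bool = True,
--     lower: bool = True,
--     length: int = 20,
-- ) -> bool:
--     """Check if a secret meets conditions."""
--     conditions: list[bool] = []
--
--     if punctuation:
--         conditions.append(any(s in string.punctuation for s in secret))
--     if lower:
--         conditions.append(any(s.islower() for s in secret))
--     if upper:
--         conditions.append(any(s.isupper() for s in secret))
--     if digit:
--         conditions.append(any(s.isdigit() for s in secret))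
--     if length:
--         conditions.append(len(secret) == length)
--
--     return all(conditions)
-- ===== SOURCE B (Python) =====
-- import string
--
-- def check_secret_conditions(
--     secret: str,
--     punctuation: bool = True,
--     upper: bool = True,
--     digit: bool = True,
--     lower: bool = True,
--     length: int = 20,
-- ) -> bool:
--     """Check if a secret meets conditions (single pass over the secret)."""
--     has_punct = has_lower = has_upper = has_digit = False
--     for c in secret:
--         if c in string.punctuation:
--             has_punct = True
--         if c.islower():
--             has_lower = True
--         if c.isupper():
--             has_upper = True
--         if c.isdigit():
--             has_digit = True
--     result = True
--     if punctuation: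
--         result = result and has_punct
--     if lower:
--         result = result and has_lower
--     if upper:
--         result = result and has_upper
--     if digit:
--         result = result and has_digit
--     if length:
--         result = result and len(secret) == length
--     return result
-- ===== Notes on version B (the rewrite author's own statement) =====
-- stated objective: alternative
-- what changed: B replaces A's four separate any() scans plus a conditions list with one pass over the secret maintaining four flags, then ANDs in only the enabled checks.
import Mathlib
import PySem

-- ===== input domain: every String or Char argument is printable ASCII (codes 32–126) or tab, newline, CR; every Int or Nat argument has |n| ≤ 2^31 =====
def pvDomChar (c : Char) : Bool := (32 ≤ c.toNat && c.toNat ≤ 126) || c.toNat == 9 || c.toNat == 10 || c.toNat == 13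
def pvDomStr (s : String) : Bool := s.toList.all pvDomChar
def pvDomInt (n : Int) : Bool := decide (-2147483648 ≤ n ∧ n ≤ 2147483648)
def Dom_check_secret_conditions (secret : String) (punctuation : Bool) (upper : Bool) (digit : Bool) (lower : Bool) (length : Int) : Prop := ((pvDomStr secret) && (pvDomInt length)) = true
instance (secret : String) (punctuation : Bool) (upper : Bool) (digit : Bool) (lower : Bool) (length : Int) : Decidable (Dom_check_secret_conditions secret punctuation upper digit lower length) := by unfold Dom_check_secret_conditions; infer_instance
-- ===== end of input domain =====

-- B does one pass over the secret maintaining four flags instead of A's four any() scans; same results, stated as plain equivalence.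

-- ===== PORT A =====
-- string.punctuation
def pvPunct : List Char := "!\"#$%&'()*+,-./:;<=>?@[\\]^_`{|}~".toList

def check_secret_conditions (secret : String) (punctuation : Bool) (upper : Bool) (digit : Bool) (lower : Bool) (length : Int) : Bool :=
  let conditions : List Bool := []
  let conditions := if punctuation then conditions ++ [secret.toList.any (fun s => pvPunct.contains s)] else conditions
  let conditions := if lower then conditions ++ [secret.toList.any (fun s => PySem.Chars.islower s)] else conditions
  let conditions := if upper then conditions ++ [secret.toList.any (fun s => PySem.Chars.isupper s)] else conditions
  let conditions := if digit then conditions ++ [secret.toList.any (fun s => PySem.Chars.isdigit s)] else conditions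
  let conditions := if length ≠ 0 then conditions ++ [decide (PySem.Str.len secret = length)] else conditions
  conditions.all id

-- ===== PORT B =====
def pvStep (f : Bool × Bool × Bool × Bool) (c : Char) : Bool × Bool × Bool × Bool :=
  ( if pvPunct.contains c then true else f.1,
    if PySem.Chars.islower c then true else f.2.1,
    if PySem.Chars.isupper c then true else f.2.2.1,
    if PySem.Chars.isdigit c then true else f.2.2.2 )

def check_secret_conditions_alt (secret : String) (punctuation : Bool) (upper : Bool) (digit : Bool) (lower : Bool) (length : Int) : Bool :=
  let f := secret.toList.foldl pvStep (false, false, false, false)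
  let result := true
  let result := if punctuation then result && f.1 else result
  let result := if lower then result && f.2.1 else result
  let result := if upper then result && f.2.2.1 else result
  let result := if digit then result && f.2.2.2 else result
  let result := if length ≠ 0 then result && decide (PySem.Str.len secret = length) else result
  result

-- ===== PRECONDITION & SPEC =====
def Spec_check_secret_conditions (secret : String) (punctuation : Bool) (upper : Bool) (digit : Bool) (lower : Bool) (length : Int) (out : Bool) : Prop := out = check_secret_conditions_alt secret punctuation upper digit lower length
instance (secret : String) (punctuation : Bool) (upper : Bool) (digit : Bool) (lower : Bool) (length : Int) (out : Bool) : Decidable (Spec_check_secret_conditions secret punctuation upper digit lower length out) := by unfold Spec_check_secret_conditions; infer_instance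

-- ===== CLAIM (what is proved, stated in full; the proofs are below) =====
def Claim_equal_check_secret_conditions : Prop := ∀ (secret : String) (punctuation : Bool) (upper : Bool) (digit : Bool) (lower : Bool) (length : Int), Dom_check_secret_conditions secret punctuation upper digit lower length → Spec_check_secret_conditions secret punctuation upper digit lower length (check_secret_conditions secret punctuation upper digit lower length)

-- ===== LEMMAS AND PROOFS =====

theorem pvStep_foldl (l : List Char) (a b c d : Bool) :
    l.foldl pvStep (a, b, c, d) =
      ( a || l.any (fun s => pvPunct.contains s),
        b || l.any (fun s => PySem.Chars.islower s),
        c || l.any (fun s => PySem.Chars.isupper s),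
        d || l.any (fun s => PySem.Chars.isdigit s) ) := by
  induction l generalizing a b c d with
  | nil => simp
  | cons x xs ih =>
    simp only [List.foldl_cons, List.any_cons, pvStep, ih]
    split_ifs <;> simp_all

theorem check_secret_conditions_spec : Claim_equal_check_secret_conditions := by
  intro secret punctuation upper digit lower length _
  unfold Spec_check_secret_conditions check_secret_conditions check_secret_conditions_alt
  simp only [pvStep_foldl, Bool.false_or]
  split_ifs <;> simp [Bool.and_comm, Bool.and_assoc, Bool.and_left_comm]
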